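-- pv_equiv track=rewrite | github.com/Kab0tan/AdventOfCode2023 | day_3.py | splitWithIndices
-- ===== SOURCE A (Python) =====
-- from itertools import groupby
--
-- def splitWithIndices(s, delimiter):
--     start = 0
--     for key, group in groupby(s, lambda x:x==delimiter):
--         g = list(group)
--         end = start + sum(1 for i in g)
--         if not key:
--             yield start, end, ''.join(g)
--         start = end
-- ===== SOURCE B (Python) =====
-- def splitWithIndices(s, delimiter):
--     i = 0
--     n = len(s)
--     while i < n:
--         if s[i] == delimiter:
--             i += 1
--         else:
--             j = i + 1
--             while j < n and s[j] != delimiter: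
--                 j += 1
--             yield i, j, s[i:j]
--             i = j
-- ===== Notes on version B (the rewrite author's own statement) =====
-- stated objective: simpler
-- what changed: Replaced itertools.groupby (grouping all runs by a key function, then measuring each group) with a direct index-based run-scanning while loop that skips delimiter characters one at a time and scans each non-delimiter run forward, slicing it out.
import Mathlib
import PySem

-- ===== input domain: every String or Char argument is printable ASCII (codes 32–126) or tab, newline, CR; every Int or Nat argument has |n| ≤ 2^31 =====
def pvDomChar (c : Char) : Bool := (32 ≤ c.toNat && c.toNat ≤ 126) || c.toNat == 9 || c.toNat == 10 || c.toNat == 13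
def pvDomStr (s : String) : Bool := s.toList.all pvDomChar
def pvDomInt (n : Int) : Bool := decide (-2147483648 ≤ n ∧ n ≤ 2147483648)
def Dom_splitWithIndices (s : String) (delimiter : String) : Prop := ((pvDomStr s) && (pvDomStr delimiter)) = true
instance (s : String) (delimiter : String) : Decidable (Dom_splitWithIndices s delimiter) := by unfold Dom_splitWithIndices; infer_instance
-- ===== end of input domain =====

-- B replaces itertools.groupby with a direct run-scanning index loop (simpler, no library grouping).

-- ===== PORT A =====
-- itertools.groupby over the characters: maximal runs of equal key (x == delimiter).
def pvGrp (p : Char → Bool) : List Char → List (Bool × List Char)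
  | [] => []
  | c :: rest =>
    (p c, c :: rest.takeWhile (fun x => p x == p c)) ::
      pvGrp p (rest.dropWhile (fun x => p x == p c))
termination_by l => l.length
decreasing_by
  simpa using Nat.lt_succ_of_le (List.length_dropWhile_le _ _)

-- A's for-loop over the groups, carrying `start`.
def pvALoop : List (Bool × List Char) → Int → List (Int × Int × String)
  | [], _ => []
  | (k, g) :: gs, start =>
    let e : Int := start + (g.length : Int)
    (if !k then [(start, e, String.ofList g)] else []) ++ pvALoop gs e

def splitWithIndices (s : String) (delimiter : String) : List (Int × Int × String) :=
  pvALoop (pvGrp (fun c => String.singleton c == delimiter) s.toList) 0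

-- ===== PORT B =====
-- B's while-loop: skip a delimiter char, or scan forward to the end of the run and emit it.
def pvBLoop (delimiter : String) : List Char → Int → List (Int × Int × String)
  | [], _ => []
  | c :: rest, i =>
    if String.singleton c == delimiter then
      pvBLoop delimiter rest (i + 1)
    else
      let run := rest.takeWhile (fun x => !(String.singleton x == delimiter))
      (i, i + 1 + (run.length : Int), String.ofList (c :: run)) ::
        pvBLoop delimiter (rest.dropWhile (fun x => !(String.singleton x == delimiter)))
          (i + 1 + (run.length : Int))
termination_by l _ => l.length
decreasing_by
  · simp
  · simpa using Nat.lt_succ_of_le (List.length_dropWhile_le _ _)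

def splitWithIndices_alt (s : String) (delimiter : String) : List (Int × Int × String) :=
  pvBLoop delimiter s.toList 0

-- ===== PRECONDITION & SPEC =====
def Spec_splitWithIndices (s : String) (delimiter : String) (out : List (Int × Int × String)) : Prop := out = splitWithIndices_alt s delimiter
instance (s : String) (delimiter : String) (out : List (Int × Int × String)) : Decidable (Spec_splitWithIndices s delimiter out) := by unfold Spec_splitWithIndices; infer_instance

-- ===== CLAIM (what is proved, stated in full; the proofs are below) =====
def Claim_equal_splitWithIndices : Prop := ∀ (s : String) (delimiter : String), Dom_splitWithIndices s delimiter → Spec_splitWithIndices s delimiter (splitWithIndices s delimiter)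

-- ===== LEMMAS AND PROOFS =====

lemma pvGrp_cons_true (p : Char → Bool) (c : Char) (rest : List Char) (h : p c = true) :
    pvGrp p (c :: rest)
      = (true, c :: rest.takeWhile p) :: pvGrp p (rest.dropWhile p) := by
  rw [pvGrp]
  have hpred : (fun x => p x == p c) = p := by
    funext x; rw [h]; cases p x <;> simp
  rw [hpred, h]

lemma pvGrp_cons_false (p : Char → Bool) (c : Char) (rest : List Char) (h : p c = false) :
    pvGrp p (c :: rest)
      = (false, c :: rest.takeWhile (fun x => !(p x))) :: pvGrp p (rest.dropWhile (fun x => !(p x))) := by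
  rw [pvGrp]
  have hpred : (fun x => p x == p c) = (fun x => !(p x)) := by
    funext x; rw [h]; cases p x <;> simp
  rw [hpred, h]

-- A's group loop, entered on a delimiter run, just advances `start` past the run.
lemma pvALoop_skip (p : Char → Bool) (l : List Char) (i : Int) :
    pvALoop (pvGrp p l) i
      = pvALoop (pvGrp p (l.dropWhile p)) (i + ((l.takeWhile p).length : Int)) := by
  cases l with
  | nil => simp [pvGrp]
  | cons c rest =>
    by_cases h : p c = true
    · rw [pvGrp_cons_true p c rest h]
      simp only [pvALoop, List.takeWhile_cons, List.dropWhile_cons, h,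
        Bool.not_true, Bool.false_eq_true, if_false, List.nil_append]
      congr 1
    · have h' : p c = false := by simpa using h
      simp [h']

lemma pvLoop_eq (delimiter : String) :
    ∀ (n : Nat) (l : List Char), l.length ≤ n → ∀ (i : Int),
      pvBLoop delimiter l i
        = pvALoop (pvGrp (fun c => String.singleton c == delimiter) l) i := by
  intro n
  induction n with
  | zero =>
    intro l hl i
    have : l = [] := List.length_eq_zero_iff.mp (Nat.le_zero.mp hl)
    subst this; simp [pvBLoop, pvGrp, pvALoop]
  | succ n ih =>
    intro l hl i
    cases l with
    | nil => simp [pvBLoop, pvGrp, pvALoop]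
    | cons c rest =>
      have hrest : rest.length ≤ n := by
        simpa using Nat.lt_succ_iff.mp (lt_of_lt_of_le (by simp) hl)
      by_cases h : (String.singleton c == delimiter) = true
      · -- delimiter char: B skips one char, A skipped the whole run at once
        rw [pvBLoop, if_pos h, ih rest hrest,
          pvALoop_skip (fun c => String.singleton c == delimiter) rest,
          pvGrp_cons_true (fun c => String.singleton c == delimiter) c rest h]
        simp only [pvALoop, Bool.not_true, Bool.false_eq_true, if_false, List.nil_append]
        congr 1
        push_cast [List.length_cons]
        ring
      · have h' : (String.singleton c == delimiter) = false := by simpa using h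
        have hdw : (rest.dropWhile (fun x => !(String.singleton x == delimiter))).length ≤ n :=
          le_trans (List.length_dropWhile_le _ _) hrest
        rw [pvBLoop, if_neg (by simp [h']),
          pvGrp_cons_false (fun c => String.singleton c == delimiter) c rest h']
        simp only [pvALoop, Bool.not_false, if_true, List.singleton_append]
        rw [ih _ hdw]
        congr 2 <;> push_cast [List.length_cons] <;> ring_nf

-- ===== VERDICT (by name: the statement is the Claim_ definition above) =====
theorem splitWithIndices_spec : Claim_equal_splitWithIndices := by
  intro s delimiter _
  unfold Spec_splitWithIndices splitWithIndices splitWithIndices_alt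
  exact (pvLoop_eq delimiter s.toList.length s.toList le_rfl 0).symm
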